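-- pv_equiv track=rewrite | github.com/Marzan1/miRNA-RNA-Deep-Learning-Model | codes/Version 2/G_dataset_preparation_2.py | validate_seed
-- ===== SOURCE A (Python) =====
-- complement = {'A': 'U', 'U': 'A', 'G': 'C', 'C': 'G'}
--
-- def validate_seed(mirna, region):
--     mirna_seed = mirna[1:8]
--
--     for i in range(len(region) - len(mirna_seed) + 1):
--         target_site = region[i : i + len(mirna_seed)]
--
--         is_perfect_match = True
--         for j in range(len(mirna_seed)):
--             if mirna_seed[j] != complement.get(target_site[j], ''):
--                 is_perfect_match = False
--                 break
--         if is_perfect_match: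
--             return True
--     return False
-- ===== SOURCE B (Python) =====
-- complement = {'A': 'U', 'U': 'A', 'G': 'C', 'C': 'G'}
--
-- def validate_seed(mirna, region):
--     # Build the complemented seed once; a non-AUGC seed char can never match.
--     try:
--         pattern = ''.join(complement[c] for c in mirna[1:8])
--     except KeyError:
--         return False
--     return pattern in region
-- ===== Notes on version B (the rewrite author's own statement) =====
-- stated objective: simpler
-- what changed: Complement the 7-char seed once (returning False on a non-AUGC seed char) and then do a single substring search 'pattern in region' instead of the nested per-window char-by-char comparison.
import Mathlib
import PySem

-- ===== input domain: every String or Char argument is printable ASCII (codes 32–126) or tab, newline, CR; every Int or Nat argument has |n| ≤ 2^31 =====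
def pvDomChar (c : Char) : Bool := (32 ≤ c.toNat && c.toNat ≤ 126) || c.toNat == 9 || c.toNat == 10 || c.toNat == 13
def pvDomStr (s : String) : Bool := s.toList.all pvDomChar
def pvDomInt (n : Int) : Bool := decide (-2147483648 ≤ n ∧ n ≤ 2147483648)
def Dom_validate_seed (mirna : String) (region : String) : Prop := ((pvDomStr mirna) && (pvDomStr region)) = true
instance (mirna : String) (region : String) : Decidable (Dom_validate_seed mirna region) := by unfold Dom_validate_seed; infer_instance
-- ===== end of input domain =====

-- B complements the 7-char seed once and does a single substring search instead of A's nested per-window comparison (simpler).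


-- ===== PORT A =====
-- shared constant: the module-level dict `complement` (Char-level: Python's 1-char strings)
def pvComp : PySem.Dict Char Char := PySem.Dict.ofList [('A','U'),('U','A'),('G','C'),('C','G')]

-- inner `for j in range(len(mirna_seed))` with break: `mirna_seed[j] != complement.get(target_site[j], '')`
-- ('' never equals a 1-char string, so the default-'' lookup is `Option`; exact on the reachable windows,
-- whose length equals the seed's)
def vsInner : List Char → List Char → Bool
  | [], _ => true
  | s :: ss, t :: ts => if some s ≠ pvComp.get? t then false else vsInner ss ts
  | _ :: _, [] => false

-- outer `for i in range(len(region) - len(mirna_seed) + 1)`: n = remaining iterations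
def vsOuter (seed region : List Char) : Nat → Nat → Bool
  | _, 0 => false
  | i, n + 1 =>
    let target := PySem.List.slice region (some (i : Int)) (some ((i : Int) + (seed.length : Int)))
    if vsInner seed target then true else vsOuter seed region (i + 1) n

def validate_seed (mirna : String) (region : String) : Bool :=
  let seed := PySem.List.slice mirna.toList (some 1) (some 8)
  vsOuter seed region.toList 0 (region.toList.length + 1 - seed.length)

-- ===== PORT B =====
-- ''.join(complement[c] for c in mirna[1:8]) inside try/except KeyError → Option
def buildPattern : List Char → Option (List Char)
  | [] => some []
  | c :: cs =>
    match pvComp.get? c with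
    | none => none
    | some d => (buildPattern cs).map (d :: ·)

def validate_seed_alt (mirna : String) (region : String) : Bool :=
  match buildPattern (PySem.List.slice mirna.toList (some 1) (some 8)) with
  | none => false
  | some pat => PySem.Chars.isIn pat region.toList

-- ===== PRECONDITION & SPEC =====
def Spec_validate_seed (mirna : String) (region : String) (out : Bool) : Prop := out = validate_seed_alt mirna region
instance (mirna : String) (region : String) (out : Bool) : Decidable (Spec_validate_seed mirna region out) := by unfold Spec_validate_seed; infer_instance

-- ===== CLAIM (what is proved, stated in full; the proofs are below) =====
def Claim_equal_validate_seed : Prop := ∀ (mirna : String) (region : String), Dom_validate_seed mirna region → Spec_validate_seed mirna region (validate_seed mirna region)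

-- ===== LEMMAS AND PROOFS =====

-- the literal dict, characterised
theorem pvComp_get?_eq (a b : Char) :
    pvComp.get? a = some b ↔
      (a = 'A' ∧ b = 'U') ∨ (a = 'U' ∧ b = 'A') ∨ (a = 'G' ∧ b = 'C') ∨ (a = 'C' ∧ b = 'G') := by
  show (PySem.Dict.mk [('A','U'),('U','A'),('G','C'),('C','G')]).get? a = some b ↔ _
  simp only [PySem.Dict.get?_mk_cons]
  constructor
  · intro h
    split_ifs at h with h1 h2 h3 h4 <;> simp_all [PySem.Dict.get?] <;> tauto
  · rintro (⟨h1, h2⟩ | ⟨h1, h2⟩ | ⟨h1, h2⟩ | ⟨h1, h2⟩) <;> subst h1 <;> subst h2 <;> rfl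

theorem pvComp_inv (a b : Char) : pvComp.get? a = some b ↔ pvComp.get? b = some a := by
  rw [pvComp_get?_eq, pvComp_get?_eq]
  constructor <;> rintro (⟨h1, h2⟩ | ⟨h1, h2⟩ | ⟨h1, h2⟩ | ⟨h1, h2⟩) <;> subst h1 <;> subst h2 <;> simp

-- if some seed char is not a key of the dict, no window matches
theorem vsInner_of_bad (seed t : List Char) (hbad : buildPattern seed = none) :
    vsInner seed t = false := by
  induction seed generalizing t with
  | nil => simp [buildPattern] at hbad
  | cons s ss ih =>
    cases t with
    | nil => rfl
    | cons c cs =>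
      simp only [vsInner]
      split
      · rfl
      · rename_i h
        push_neg at h
        simp only [buildPattern] at hbad
        cases hks : pvComp.get? s with
        | some d => simp [hks] at hbad; exact ih _ hbad
        | none =>
          exfalso
          have h2 := (pvComp_inv c s).mp h.symm
          rw [h2] at hks
          exact Option.some_ne_none _ hks

theorem buildPattern_length (seed pat : List Char) (h : buildPattern seed = some pat) :
    pat.length = seed.length := by
  induction seed generalizing pat with
  | nil => simp only [buildPattern, Option.some.injEq] at h; subst h; rfl
  | cons s ss ih =>
    simp only [buildPattern] at h
    cases hks : pvComp.get? s with
    | none => rw [hks] at h; exact absurd h (by simp)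
    | some d =>
      rw [hks] at h
      cases hrest : buildPattern ss with
      | none => rw [hrest] at h; simp at h
      | some ps =>
        rw [hrest] at h
        simp only [Option.map_some, Option.some.injEq] at h
        subst h
        simp [ih ps hrest]

-- with a good seed: a window matches exactly when the complemented pattern is a prefix of it
theorem vsInner_iff_prefix (seed pat t : List Char) (h : buildPattern seed = some pat) :
    vsInner seed t = true ↔ pat <+: t := by
  induction seed generalizing pat t with
  | nil =>
    simp only [buildPattern, Option.some.injEq] at h
    subst h
    simp [vsInner]
  | cons s ss ih =>
    simp only [buildPattern] at h
    cases hks : pvComp.get? s with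
    | none => rw [hks] at h; exact absurd h (by simp)
    | some d =>
      rw [hks] at h
      cases hrest : buildPattern ss with
      | none => rw [hrest] at h; simp at h
      | some ps =>
        rw [hrest] at h
        simp only [Option.map_some, Option.some.injEq] at h
        subst h
        cases t with
        | nil => simp [vsInner]
        | cons c cs =>
          simp only [vsInner]
          by_cases hc : c = d
          · subst hc
            have hcc : pvComp.get? c = some s := (pvComp_inv s c).mp hks
            simp [hcc, ih ps cs hrest, List.cons_prefix_cons]
          · have hne : some s ≠ pvComp.get? c := by
              intro he
              have h2 := (pvComp_inv c s).mp he.symm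
              rw [h2] at hks
              exact hc (by injection hks)
            have hdc : ¬ (d = c) := fun hh => hc hh.symm
            simp [hne, List.cons_prefix_cons, hdc]

-- the outer loop, characterised as an existential over window starts
theorem vsOuter_iff (seed r : List Char) (i n : Nat) :
    vsOuter seed r i n = true ↔
      ∃ k < n, vsInner seed (PySem.List.slice r (some ((i + k : Nat) : Int))
        (some (((i + k : Nat) : Int) + (seed.length : Int)))) = true := by
  induction n generalizing i with
  | zero => simp [vsOuter]
  | succ n ih =>
    simp only [vsOuter]
    split
    · rename_i h
      simp only [true_iff]
      exact ⟨0, Nat.succ_pos n, by simpa using h⟩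
    · rename_i h
      rw [ih]
      constructor
      · rintro ⟨k, hk, hm⟩
        exact ⟨k + 1, by omega, by convert hm using 4 <;> omega⟩
      · rintro ⟨k, hk, hm⟩
        cases k with
        | zero => exact absurd hm (by simpa using h)
        | succ k => exact ⟨k, by omega, by convert hm using 4 <;> omega⟩

theorem main_eq (seed r : List Char) :
    vsOuter seed r 0 (r.length + 1 - seed.length) =
      match buildPattern seed with
      | none => false
      | some pat => PySem.Chars.isIn pat r := by
  cases hbp : buildPattern seed with
  | none =>
    simp only
    rw [Bool.eq_false_iff, Ne, vsOuter_iff]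
    push_neg
    intro k _
    simp [vsInner_of_bad seed _ hbp]
  | some pat =>
    have hlen : pat.length = seed.length := buildPattern_length seed pat hbp
    simp only
    cases hin : PySem.Chars.isIn pat r with
    | false =>
      rw [Bool.eq_false_iff, Ne, vsOuter_iff]
      push_neg
      intro k hk
      intro hv
      rw [vsInner_iff_prefix seed pat _ hbp] at hv
      rw [PySem.List.slice_natCast_add] at hv
      have hex : ∃ j, pat <+: r.drop j := ⟨0 + k, hv.trans (List.take_prefix _ _)⟩
      rw [PySem.Chars.exists_prefix_drop_iff_isIn] at hex
      rw [hex] at hin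
      exact Bool.noConfusion hin
    | true =>
      rw [vsOuter_iff]
      rw [← PySem.Chars.exists_prefix_drop_iff_isIn] at hin
      obtain ⟨j, hj⟩ := hin
      have hjlen : pat.length ≤ (r.drop j).length := hj.length_le
      simp only [List.length_drop] at hjlen
      by_cases hjr : j ≤ r.length
      · refine ⟨j, by omega, ?_⟩
        rw [vsInner_iff_prefix seed pat _ hbp]
        rw [PySem.List.slice_natCast_add]
        simp only [Nat.zero_add]
        rw [← hlen]
        rcases hj with ⟨s, hs⟩
        exact ⟨[], by simp [← hs, List.take_append_of_le_length (le_refl pat.length)]⟩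
      · have hdrop : r.drop j = [] := List.drop_eq_nil_of_le (by omega)
        rw [hdrop] at hj
        have hpat : pat = [] := List.prefix_nil.mp hj
        have hsl : seed.length = 0 := by rw [← hlen, hpat]; rfl
        refine ⟨0, by omega, ?_⟩
        rw [vsInner_iff_prefix seed pat _ hbp]
        simp [hpat]

-- ===== VERDICT (by name: the statement is the Claim_ definition above) =====
theorem validate_seed_spec : Claim_equal_validate_seed := by
  intro mirna region _
  unfold Spec_validate_seed validate_seed validate_seed_alt
  exact main_eq _ _
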